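-- pv_equiv track=rewrite | github.com/TeamJumpstart/InformatiCup2021 | tool_render_opponent_overview.py | names_to_codes
-- ===== SOURCE A (Python) =====
-- def names_to_codes(names):
--     code_map = {}
--     id = 0
--
--     codes = []
--     for name in names:
--         if name not in code_map:
--             code_map[name] = id
--             id += 1
--
--         codes.append(code_map[name])
--
--     return codes
-- ===== SOURCE B (Python) =====
-- def names_to_codes(names):
--     names = list(names)
--     return [len(set(names[:names.index(n) + 1])) - 1 for n in names]
-- ===== Notes on version B (the rewrite author's own statement) =====
-- stated objective: alternative
-- what changed: B keeps no incremental code table at all: for each name it computes its code directly as the number of distinct names in the prefix up to and including that name's first occurrence, minus one, via names.index and a per-element set of a prefix slice; this trades A's single O(n) dict-building loop for a table-free closed-form per element (O(n^2)).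
import Mathlib
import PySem

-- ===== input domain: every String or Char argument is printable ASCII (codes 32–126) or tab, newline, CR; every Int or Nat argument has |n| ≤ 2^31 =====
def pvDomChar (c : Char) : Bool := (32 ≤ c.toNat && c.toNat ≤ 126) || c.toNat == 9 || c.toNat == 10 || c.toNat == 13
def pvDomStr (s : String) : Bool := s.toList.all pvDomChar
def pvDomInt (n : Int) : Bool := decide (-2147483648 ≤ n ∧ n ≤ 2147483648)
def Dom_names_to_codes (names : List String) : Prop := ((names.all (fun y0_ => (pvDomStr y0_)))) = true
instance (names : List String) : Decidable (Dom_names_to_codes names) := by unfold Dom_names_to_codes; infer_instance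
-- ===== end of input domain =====

-- B drops A's incremental dict/counter loop entirely: each code is computed directly as the
-- number of distinct names in the prefix ending at that name's first occurrence, minus one
-- (objective: alternative; table-free closed form per element, O(n^2) vs A's O(n)).

-- ===== PORT A =====
-- the loop: state (code_map, id, codes); code_map[name] after the possible insert is always
-- present, so `.getD 0` never supplies the default
def namesToCodesLoop (cm : PySem.Dict String Int) (id : Int) (codes : List Int) :
    List String → List Int
  | [] => codes
  | n :: rest =>
    let st := if cm.contains n then (cm, id) else (cm.insert n id, id + 1)
    namesToCodesLoop st.1 st.2 (codes ++ [(st.1.get? n).getD 0]) rest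

def names_to_codes (names : List String) : List Int :=
  namesToCodesLoop PySem.Dict.empty 0 [] names

-- ===== PORT B =====
-- Source B: [len(set(names[:names.index(n) + 1])) - 1 for n in names]
-- names.index(n) always succeeds (n is drawn from names), so the `none` arm never fires.
def names_to_codes_alt (names : List String) : List Int :=
  names.map (fun n =>
    match PySem.List.index? names n with
    | some j =>
        PySem.Set.len (PySem.Set.ofList (PySem.List.slice names none (some ((j : Int) + 1)))) - 1
    | none => 0)

-- ===== PRECONDITION & SPEC =====
def Spec_names_to_codes (names : List String) (out : List Int) : Prop := out = names_to_codes_alt names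
instance (names : List String) (out : List Int) : Decidable (Spec_names_to_codes names out) := by unfold Spec_names_to_codes; infer_instance

-- ===== CLAIM (what is proved, stated in full; the proofs are below) =====
def Claim_equal_names_to_codes : Prop := ∀ (names : List String), Dom_names_to_codes names → Spec_names_to_codes names (names_to_codes names)

-- ===== LEMMAS AND PROOFS =====

-- the abstract per-step description of A: carry the list of names seen so far
def codesSpec (seen : List String) : List String → List Int
  | [] => []
  | n :: rest =>
    let seen' := PySem.Set.add seen n
    ((seen'.idxOf n : Nat) : Int) :: codesSpec seen' rest

-- A's loop computes codesSpec, under the invariant tying the dict to `seen`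
theorem loopA_eq_codesSpec (rest : List String) :
    ∀ (seen : List String) (cm : PySem.Dict String Int) (codes : List Int),
    seen.Nodup →
    (∀ n, cm.get? n = if n ∈ seen then some ((seen.idxOf n : Nat) : Int) else none) →
    namesToCodesLoop cm ((seen.length : Nat) : Int) codes rest = codes ++ codesSpec seen rest := by
  induction rest with
  | nil => intro seen cm codes _ _; simp [namesToCodesLoop, codesSpec]
  | cons n rest ih =>
    intro seen cm codes hnd hinv
    by_cases hmem : n ∈ seen
    · have hct : cm.contains n = true := by
        rw [PySem.Dict.contains_eq_isSome_get?, hinv n]; simp [hmem]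
      have hadd : PySem.Set.add seen n = seen := by simp [PySem.Set.add, hmem]
      rw [namesToCodesLoop]
      simp only [hct, if_true]
      rw [ih seen cm _ hnd hinv, codesSpec]
      simp [hinv n, hmem, List.append_assoc]
    · have hcf : cm.contains n = false := by
        rw [PySem.Dict.contains_eq_isSome_get?, hinv n]; simp [hmem]
      have hadd : PySem.Set.add seen n = seen ++ [n] := by simp [PySem.Set.add, hmem]
      have hidx : (seen ++ [n]).idxOf n = seen.length := by simp [List.idxOf_append, hmem]
      have hinv' : ∀ m, (cm.insert n ((seen.length : Nat) : Int)).get? m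
          = if m ∈ seen ++ [n] then some (((seen ++ [n]).idxOf m : Nat) : Int) else none := by
        intro m
        by_cases hm : m = n
        · subst hm; simp [PySem.Dict.get?_insert_self, hidx]
        · rw [PySem.Dict.get?_insert_of_ne _ _ hm, hinv m]
          by_cases hms : m ∈ seen
          · simp [hms, List.idxOf_append_of_mem hms]
          · simp [hms, hm]
      have hnd' : (seen ++ [n]).Nodup := by
        rw [List.nodup_append]
        refine ⟨hnd, List.nodup_singleton n, fun a ha b hb hab => hmem ?_⟩
        simp only [List.mem_singleton] at hb
        rw [hab, hb] at ha; exact ha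
      rw [namesToCodesLoop]
      simp only [hcf, Bool.false_eq_true, if_false]
      have hlen : ((seen.length : Nat) : Int) + 1 = (((seen ++ [n]).length : Nat) : Int) := by
        simp [List.length_append]
      rw [hlen, ih (seen ++ [n]) _ _ hnd' hinv', codesSpec]
      simp [hadd, PySem.Dict.get?_insert_self, hidx, List.append_assoc]

-- the Set.add fold only ever appends on the right of its accumulator
theorem foldl_add_prefix (l : List String) :
    ∀ (acc : List String), ∃ t, l.foldl PySem.Set.add acc = acc ++ t := by
  induction l with
  | nil => intro acc; exact ⟨[], by simp⟩
  | cons x l ihl =>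
    intro acc
    obtain ⟨t, ht⟩ := ihl (PySem.Set.add acc x)
    rw [List.foldl_cons, ht]
    have hx : PySem.Set.add acc x = if x ∈ acc then acc else acc ++ [x] := by
      simp [PySem.Set.add]
    rw [hx]
    split
    · exact ⟨t, rfl⟩
    · exact ⟨x :: t, by simp⟩

-- codesSpec is the map through the index in the final first-occurrence list
theorem codesSpec_eq_map (rest : List String) :
    ∀ (seen : List String),
    codesSpec seen rest = rest.map (fun n => (((rest.foldl PySem.Set.add seen).idxOf n : Nat) : Int)) := by
  induction rest with
  | nil => intro seen; simp [codesSpec]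
  | cons n rest ih =>
    intro seen
    rw [codesSpec, List.map_cons, List.foldl_cons, ih (PySem.Set.add seen n)]
    congr 2
    have hmem : n ∈ PySem.Set.add seen n := by
      simp [PySem.Set.add]; split <;> simp_all
    obtain ⟨t, ht⟩ := foldl_add_prefix rest (PySem.Set.add seen n)
    rw [ht, List.idxOf_append_of_mem hmem]

-- B's closed form agrees with the idxOf-in-final-set description, element by element
theorem closed_form_eq_idxOf (names : List String) (n : String) (hn : n ∈ names) :
    (((PySem.Set.ofList names).idxOf n : Nat) : Int)
      = (match PySem.List.index? names n with
         | some j =>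
             PySem.Set.len (PySem.Set.ofList (PySem.List.slice names none (some ((j : Int) + 1)))) - 1
         | none => 0) := by
  obtain ⟨j, hj⟩ : ∃ j, PySem.List.index? names n = some j := by
    have := (PySem.List.index?_isSome_iff names n).mpr hn
    exact Option.isSome_iff_exists.mp this
  obtain ⟨pre, suf, hsplit, hlen, hnpre⟩ := (PySem.List.index?_eq_some_iff names n j).mp hj
  rw [hj]
  -- the slice names[:j+1] = pre ++ [n]
  have hslice : PySem.List.slice names none (some ((j : Int) + 1)) = pre ++ [n] := by
    have : ((j : Int) + 1) = ((j + 1 : Nat) : Int) := by push_cast; ring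
    rw [this, PySem.List.slice_to_natCast, hsplit, ← hlen]
    simp [List.take_append]
  -- ofList (pre ++ [n]) = ofList pre ++ [n]
  have hmemofpre : n ∉ PySem.Set.ofList pre := by
    intro h; exact hnpre ((PySem.Set.mem_ofList _ _).mp h)
  have hofpre : PySem.Set.ofList (pre ++ [n]) = PySem.Set.ofList pre ++ [n] := by
    rw [PySem.Set.ofList_eq_foldl, List.foldl_append, ← PySem.Set.ofList_eq_foldl]
    simp [PySem.Set.add, PySem.Set.contains, hmemofpre]
  -- ofList names = (ofList pre ++ [n]) ++ t for some t
  obtain ⟨t, ht⟩ := foldl_add_prefix suf (PySem.Set.add (PySem.Set.ofList pre) n)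
  have hofnames : PySem.Set.ofList names = (PySem.Set.ofList pre ++ [n]) ++ t := by
    rw [PySem.Set.ofList_eq_foldl, hsplit]
    rw [show pre ++ n :: suf = (pre ++ [n]) ++ suf by simp]
    rw [List.foldl_append, List.foldl_append, List.foldl_cons, List.foldl_nil,
      ← PySem.Set.ofList_eq_foldl, ht]
    congr 1
    simp [PySem.Set.add, PySem.Set.contains, hmemofpre]
  have hidx : (PySem.Set.ofList names).idxOf n = (PySem.Set.ofList pre).length := by
    rw [hofnames, List.idxOf_append_of_mem (by simp), List.idxOf_append_of_notMem hmemofpre]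
    simp
  rw [hidx]
  simp only [hslice, hofpre, PySem.Set.len, List.length_append, List.length_singleton]
  push_cast
  ring

-- ===== VERDICT (by name: the statement is the Claim_ definition above) =====
theorem names_to_codes_spec : Claim_equal_names_to_codes := by
  intro names _
  unfold Spec_names_to_codes names_to_codes names_to_codes_alt
  have hA := loopA_eq_codesSpec names [] PySem.Dict.empty [] (by simp)
    (by intro n; simp [PySem.Dict.get?_empty])
  simp only [List.length_nil, Nat.cast_zero, List.nil_append] at hA
  rw [hA, codesSpec_eq_map]
  apply List.map_congr_left
  intro n hn
  have := closed_form_eq_idxOf names n hn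
  rw [← PySem.Set.ofList_eq_foldl]
  exact this
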